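-- pv_equiv track=rewrite | github.com/vanduc103/air_prediction | read_data.py | find_nearest_traffic_station
-- ===== SOURCE A (Python) =====
-- def find_nearest_traffic_station(e, station_map):
--     # get col, row of cell e
--     row = int(e/32)
--     col = e - row*32
--     # compute min distance with a station in station_map
--     d, d_min = 1024, 1024
--     for t in range(len(station_map)):
--         s = station_map[t]
--         i = int(s/32)
--         j = s - i*32
--         d = abs(row-i) + abs(col-j)
--         if d < d_min:
--             d_min = d
--     # find all possible nearest stations based on found d_min
--     nearest = list()
--     for t in range(len(station_map)):
--         s = station_map[t]
--         i = int(s/32)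
--         j = s - i*32
--         d = abs(row-i) + abs(col-j)
--         if d == d_min:
--             nearest.append(s)
--
--     return nearest
-- ===== SOURCE B (Python) =====
-- def find_nearest_traffic_station(e, station_map):
--     row = int(e/32)
--     col = e - row*32
--     d_min = 1024
--     nearest = []
--     for s in station_map:
--         i = int(s/32)
--         j = s - i*32
--         d = abs(row-i) + abs(col-j)
--         if d < d_min:
--             d_min = d
--             nearest = [s]
--         elif d == d_min:
--             nearest.append(s)
--     return nearest
-- ===== Notes on version B (the rewrite author's own statement) =====
-- stated objective: faster
-- what changed: Fused A's two passes (find the min distance, then collect all stations at that distance) into one loop that maintains both the running minimum and the result list (reset on strict improvement, append on tie).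
import Mathlib
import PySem

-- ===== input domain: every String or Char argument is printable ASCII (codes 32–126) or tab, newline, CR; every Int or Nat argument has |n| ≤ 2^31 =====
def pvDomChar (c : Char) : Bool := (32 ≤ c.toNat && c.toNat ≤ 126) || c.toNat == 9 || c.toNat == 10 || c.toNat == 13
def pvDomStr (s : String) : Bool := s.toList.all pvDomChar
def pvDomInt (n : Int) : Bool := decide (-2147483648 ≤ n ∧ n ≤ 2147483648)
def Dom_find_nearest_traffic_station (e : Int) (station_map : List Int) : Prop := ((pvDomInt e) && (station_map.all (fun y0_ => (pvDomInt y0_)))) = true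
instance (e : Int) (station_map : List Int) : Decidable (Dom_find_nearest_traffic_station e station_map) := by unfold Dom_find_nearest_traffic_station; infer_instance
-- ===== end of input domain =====

-- B fuses A's two passes (find the min Manhattan distance, then collect all stations at it)
-- into one loop maintaining the running minimum and the result list; return values proved equal.


-- ===== PORT A =====
-- int(x/32) on an int with |x| ≤ 2^31 is exact float division by a power of two followed by
-- truncation toward zero: Int.tdiv.
def find_nearest_traffic_station (e : Int) (station_map : List Int) : List Int :=
  let row := e.tdiv 32
  let col := e - row * 32
  let d_min := station_map.foldl (fun dm s =>
    let i := s.tdiv 32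
    let j := s - i * 32
    let d := |row - i| + |col - j|
    if d < dm then d else dm) (1024 : Int)
  station_map.foldl (fun acc s =>
    let i := s.tdiv 32
    let j := s - i * 32
    let d := |row - i| + |col - j|
    if d = d_min then acc ++ [s] else acc) ([] : List Int)

-- ===== PORT B =====
def find_nearest_traffic_station_alt (e : Int) (station_map : List Int) : List Int :=
  let row := e.tdiv 32
  let col := e - row * 32
  (station_map.foldl (fun (st : Int × List Int) s =>
    let i := s.tdiv 32
    let j := s - i * 32
    let d := |row - i| + |col - j|
    if d < st.1 then (d, [s])
    else if d = st.1 then (st.1, st.2 ++ [s])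
    else st) ((1024 : Int), ([] : List Int))).2

-- ===== PRECONDITION & SPEC =====
def Spec_find_nearest_traffic_station (e : Int) (station_map : List Int) (out : List Int) : Prop := out = find_nearest_traffic_station_alt e station_map
instance (e : Int) (station_map : List Int) (out : List Int) : Decidable (Spec_find_nearest_traffic_station e station_map out) := by unfold Spec_find_nearest_traffic_station; infer_instance

-- ===== CLAIM (what is proved, stated in full; the proofs are below) =====
def Claim_equal_find_nearest_traffic_station : Prop := ∀ (e : Int) (station_map : List Int), Dom_find_nearest_traffic_station e station_map → Spec_find_nearest_traffic_station e station_map (find_nearest_traffic_station e station_map)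

-- ===== LEMMAS AND PROOFS =====

-- running minimum never increases
theorem pv_minfold_le (f : Int → Int) (l : List Int) (m : Int) :
    l.foldl (fun dm s => if f s < dm then f s else dm) m ≤ m := by
  induction l generalizing m with
  | nil => simp
  | cons s l ih =>
    simp only [List.foldl_cons]
    split
    · exact le_trans (ih (f s)) (le_of_lt ‹_›)
    · exact ih m

-- A's collect pass is a filter
theorem pv_collect_eq_filter (f : Int → Int) (M : Int) (l : List Int) (acc : List Int) :
    l.foldl (fun acc s => if f s = M then acc ++ [s] else acc) acc
      = acc ++ l.filter (fun s => f s = M) := by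
  induction l generalizing acc with
  | nil => simp
  | cons s l ih =>
    simp only [List.foldl_cons, List.filter_cons]
    by_cases h : f s = M <;> simp [h, ih]

-- B's fused fold: the final state is the running min together with the stations achieving it
theorem pv_bfold (f : Int → Int) (l : List Int) (m : Int) (acc : List Int) :
    l.foldl (fun (st : Int × List Int) s =>
        if f s < st.1 then (f s, [s])
        else if f s = st.1 then (st.1, st.2 ++ [s])
        else st) (m, acc)
      = (l.foldl (fun dm s => if f s < dm then f s else dm) m,
         (if l.foldl (fun dm s => if f s < dm then f s else dm) m = m then acc else [])
           ++ l.filter (fun s => f s = l.foldl (fun dm s => if f s < dm then f s else dm) m)) := by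
  induction l generalizing m acc with
  | nil => simp
  | cons s l ih =>
    simp only [List.foldl_cons, List.filter_cons]
    by_cases h1 : f s < m
    · simp only [if_pos h1]
      rw [ih (f s) [s]]
      have hle := pv_minfold_le f l (f s)
      have hne : l.foldl (fun dm s => if f s < dm then f s else dm) (f s) ≠ m :=
        ne_of_lt (lt_of_le_of_lt hle h1)
      simp only [if_neg hne, List.nil_append]
      by_cases h2 : l.foldl (fun dm s => if f s < dm then f s else dm) (f s) = f s
      · simp [h2]
      · have h2' : ¬ f s = l.foldl (fun dm s => if f s < dm then f s else dm) (f s) :=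
          fun h => h2 h.symm
        simp [h2, h2']
    · simp only [if_neg h1]
      by_cases h2 : f s = m
      · simp only [if_pos h2]
        rw [ih m (acc ++ [s])]
        have hle := pv_minfold_le f l m
        by_cases h3 : l.foldl (fun dm s => if f s < dm then f s else dm) m = m
        · simp [h3, h2]
        · have : ¬ (f s = l.foldl (fun dm s => if f s < dm then f s else dm) m) := by
            rw [h2]; exact fun h => h3 h.symm
          simp [h3, this]
      · simp only [if_neg h2]
        rw [ih m acc]
        have hle := pv_minfold_le f l m
        have : ¬ (f s = l.foldl (fun dm s => if f s < dm then f s else dm) m) := by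
          intro h
          rcases lt_or_eq_of_le hle with hlt | heq
          · exact absurd (h ▸ hlt) (by omega)
          · exact h2 (h.trans heq)
        simp [this]

-- ===== VERDICT (by name: the statement is the Claim_ definition above) =====
theorem find_nearest_traffic_station_spec : Claim_equal_find_nearest_traffic_station := by
  intro e station_map _
  show find_nearest_traffic_station e station_map = find_nearest_traffic_station_alt e station_map
  unfold find_nearest_traffic_station find_nearest_traffic_station_alt
  simp only [pv_collect_eq_filter, pv_bfold, List.nil_append]
  split <;> simp
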